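-- pv_equiv track=rewrite | github.com/SunwoongH/algorithm | Programmers/PCCP/유전법칙.py | find
-- ===== SOURCE A (Python) =====
-- def find(gen, order):
--     if gen == 1:
--         return "Rr"
--     cut = 4 ** (gen - 2)
--     if order <= cut:
--         return 'RR'
--     elif cut * 3 < order:
--         return 'rr'
--     return find(gen - 1, order % cut if order % cut > 0 else cut)
-- ===== SOURCE B (Python) =====
-- def find(gen, order):
--     hi = 4 ** (gen - 1)
--     n = min(max(order - 1, 0), hi - 1)   # clamp into the tree's valid range, as A's top-level comparisons do
--     for level in range(gen - 1, 0, -1):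
--         digit = n // 4 ** (level - 1) % 4
--         if digit == 0:
--             return 'RR'
--         if digit == 3:
--             return 'rr'
--     return 'Rr'
-- ===== Notes on version B (the rewrite author's own statement) =====
-- stated objective: alternative
-- what changed: Replaces A's level-by-level recursion (recomputing cut and reducing order modulo cut at each generation) with a single non-recursive loop that clamps order-1 once into [0, 4^(gen-1)-1] and scans its base-4 digits from most significant to least, returning on the first digit 0 ('RR') or 3 ('rr').
-- outside the precondition, e.g. on find(0, 1): A returns 'rr', B returns 'Rr'
import Mathlib
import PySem

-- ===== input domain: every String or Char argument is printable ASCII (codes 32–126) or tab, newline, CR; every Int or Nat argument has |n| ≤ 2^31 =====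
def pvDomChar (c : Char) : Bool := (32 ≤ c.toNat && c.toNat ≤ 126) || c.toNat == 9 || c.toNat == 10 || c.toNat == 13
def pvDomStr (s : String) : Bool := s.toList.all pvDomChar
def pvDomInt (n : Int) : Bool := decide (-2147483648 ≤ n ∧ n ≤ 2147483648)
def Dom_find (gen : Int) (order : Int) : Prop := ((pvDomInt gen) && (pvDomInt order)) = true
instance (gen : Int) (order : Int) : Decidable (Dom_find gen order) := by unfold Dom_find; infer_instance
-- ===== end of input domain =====

-- B replaces A's per-generation recursion by one clamp plus a most-significant-first
-- base-4 digit scan (alternative decomposition, same cost; return value only, no mutation).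

-- ===== PORT A =====
-- A recurses with gen-1; for gen ≥ 1 the depth is at most gen, so gen.toNat fuel suffices
-- (the fuel-0 default "" is unreachable inside Pre_find).
def findFuel : Nat → Int → Int → String
  | 0, _, _ => ""
  | fuel + 1, gen, order =>
    if gen = 1 then "Rr"
    else
      let cut : Int := 4 ^ (gen - 2).toNat   -- Python 4**(gen-2); exact for gen ≥ 2 (Pre_ keeps gen ≥ 1)
      if order ≤ cut then "RR"
      else if cut * 3 < order then "rr"
      else findFuel fuel (gen - 1)
            (if PySem.Int.mod order cut > 0 then PySem.Int.mod order cut else cut)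

def find (gen : Int) (order : Int) : String := findFuel gen.toNat gen order

-- ===== PORT B =====
def scanDigits (n : Int) : List Int → String
  | [] => "Rr"
  | level :: rest =>
    let digit := PySem.Int.mod (PySem.Int.floordiv n (4 ^ (level - 1).toNat)) 4
    if digit = 0 then "RR"
    else if digit = 3 then "rr"
    else scanDigits n rest

def find_alt (gen : Int) (order : Int) : String :=
  let hi : Int := 4 ^ (gen - 1).toNat   -- Python 4**(gen-1); exact for gen ≥ 1 (Pre_)
  let n : Int := min (max (order - 1) 0) (hi - 1)
  scanDigits n (PySem.List.pyRange (gen - 1) 0 (-1))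

-- ===== PRECONDITION & SPEC =====
-- Pre_ excludes gen ≤ 0, where Python's 4**(gen-2) is a FLOAT and A's returned branch is an
-- accident of float comparison/modulo semantics, not portable under the int convention.
def Pre_find (gen : Int) (order : Int) : Prop := 1 ≤ gen
instance (gen : Int) (order : Int) : Decidable (Pre_find gen order) := by unfold Pre_find; infer_instance
def pvWitness_find : Int × Int := (3, 7)
def Spec_find (gen : Int) (order : Int) (out : String) : Prop := out = find_alt gen order
instance (gen : Int) (order : Int) (out : String) : Decidable (Spec_find gen order out) := by unfold Spec_find; infer_instance

-- ===== CLAIM (what is proved, stated in full; the proofs are below) =====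
def Claim_equal_find : Prop := ∀ (gen : Int) (order : Int), Dom_find gen order → Pre_find gen order → Spec_find gen order (find gen order)

-- ===== LEMMAS AND PROOFS =====

-- scanDigits only looks at n modulo 4^m when the remaining levels are m .. 1.
lemma scanDigits_emod_pow (m : Nat) (n : Int) (hn : 0 ≤ n) :
    scanDigits (n % (4:Int) ^ m) (PySem.List.pyRange (m : Int) 0 (-1))
      = scanDigits n (PySem.List.pyRange (m : Int) 0 (-1)) := by
  induction m generalizing n with
  | zero =>
    rw [PySem.List.pyRange_neg_one_eq_nil (by norm_num)]
    rfl
  | succ j ih =>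
    have hc : (0:Int) < 4 ^ j := by positivity
    have hx0 : 0 ≤ n % (4:Int) ^ (j+1) := Int.emod_nonneg n (by positivity)
    have hsplit : n = n % (4:Int)^(j+1) + (n / (4:Int)^(j+1) * 4) * 4 ^ j := by
      have h1 := Int.ediv_add_emod n ((4:Int)^(j+1))
      have h2 : (4:Int)^(j+1) = 4^j * 4 := pow_succ 4 j
      linear_combination -h1 + (n / (4:Int)^(j+1)) * h2
    have hfn : PySem.Int.floordiv n ((4:Int)^j)
        = PySem.Int.floordiv (n % (4:Int)^(j+1)) ((4:Int)^j) + (n / (4:Int)^(j+1)) * 4 := by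
      rw [PySem.Int.floordiv_eq_ediv_of_pos hc, PySem.Int.floordiv_eq_ediv_of_pos hc]
      conv_lhs => rw [hsplit]
      exact Int.add_mul_ediv_right _ _ (ne_of_gt hc)
    have hmod : PySem.Int.mod (PySem.Int.floordiv n ((4:Int)^j)) 4
        = PySem.Int.mod (PySem.Int.floordiv (n % (4:Int)^(j+1)) ((4:Int)^j)) 4 := by
      rw [PySem.Int.mod_eq_emod_of_pos (by norm_num), PySem.Int.mod_eq_emod_of_pos (by norm_num),
        hfn, Int.add_mul_emod_self_right]
    have hcast : ((j+1 : Nat) : Int) = (j:Int) + 1 := by push_cast; ring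
    rw [hcast, PySem.List.pyRange_neg_one_cons (by omega : (0:Int) < (j:Int)+1),
      show (j:Int) + 1 - 1 = (j:Int) by ring]
    simp only [scanDigits, show ((j:Int) + 1 - 1).toNat = j by omega, hmod]
    split
    · rfl
    · split
      · rfl
      · have h1 : scanDigits (n % (4:Int)^(j+1)) (PySem.List.pyRange (j:Int) 0 (-1))
            = scanDigits (n % (4:Int)^(j+1) % (4:Int)^j) (PySem.List.pyRange (j:Int) 0 (-1)) :=
          (ih _ hx0).symm
        rw [h1, Int.emod_emod_of_dvd n (pow_dvd_pow 4 (by omega)), ih n hn]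

-- Core: for 1 ≤ g and an in-range offset n (order = n+1), A's recursion equals B's digit scan.
lemma find_eq_scan (g : Nat) (hg : 1 ≤ g) (n : Int) (h0 : 0 ≤ n) (h1 : n < (4:Int) ^ (g - 1)) :
    findFuel g (g : Int) (n + 1) = scanDigits n (PySem.List.pyRange ((g : Int) - 1) 0 (-1)) := by
  induction g generalizing n with
  | zero => omega
  | succ k ih =>
    rcases Nat.eq_zero_or_pos k with hk | hk
    · subst hk
      rw [show ((0+1 : Nat) : Int) - 1 = 0 by norm_num, PySem.List.pyRange_neg_one_eq_nil (by norm_num)]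
      simp [findFuel, scanDigits]
    · have hc : (0:Int) < 4 ^ (k-1) := by positivity
      have h4 : (4:Int) ^ k = 4 ^ (k-1) * 4 := by
        conv_lhs => rw [show k = (k-1)+1 by omega]
        rw [pow_succ]
      have hdr := Int.ediv_add_emod n ((4:Int) ^ (k-1))
      set q : Int := n / 4 ^ (k-1) with hqdef
      set r : Int := n % 4 ^ (k-1) with hrdef
      have hr0 : 0 ≤ r := Int.emod_nonneg n (ne_of_gt hc)
      have hrlt : r < 4 ^ (k-1) := Int.emod_lt_of_pos n hc
      have hq0 : 0 ≤ q := Int.ediv_nonneg h0 (le_of_lt hc)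
      have hqlt : q < 4 := by
        rw [hqdef, Int.ediv_lt_iff_lt_mul hc]
        have h1' : n < (4:Int) ^ k := h1
        rw [h4] at h1'
        linarith
      -- unfold A one step
      have hA : findFuel (k+1) ((k+1 : Nat) : Int) (n + 1)
          = (if n + 1 ≤ 4 ^ (k-1) then "RR"
             else if (4:Int) ^ (k-1) * 3 < n + 1 then "rr"
             else findFuel k (((k+1 : Nat) : Int) - 1)
               (if PySem.Int.mod (n+1) ((4:Int) ^ (k-1)) > 0 then PySem.Int.mod (n+1) ((4:Int) ^ (k-1)) else (4:Int) ^ (k-1))) := by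
        simp only [findFuel]
        rw [show ((((k+1 : Nat) : Int)) - 2).toNat = k - 1 by omega,
          if_neg (show ¬(((k+1 : Nat) : Int) = 1) by push_cast; omega)]
      have hcast1 : ((k+1 : Nat) : Int) - 1 = (k : Int) := by push_cast; ring
      -- unfold B one step
      have hB : scanDigits n (PySem.List.pyRange (((k+1 : Nat) : Int) - 1) 0 (-1))
          = (if q = 0 then "RR" else if q = 3 then "rr"
             else scanDigits n (PySem.List.pyRange ((k : Int) - 1) 0 (-1))) := by
        rw [hcast1, PySem.List.pyRange_neg_one_cons (show (0:Int) < (k:Int) by exact_mod_cast hk)]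
        simp only [scanDigits]
        rw [show ((k:Int) - 1).toNat = k - 1 by omega,
          PySem.Int.floordiv_eq_ediv_of_pos hc, ← hqdef,
          PySem.Int.mod_eq_emod_of_pos (by norm_num : (0:Int) < 4),
          Int.emod_eq_of_lt hq0 hqlt]
      -- A's recursion argument is r+1
      have horder : (if PySem.Int.mod (n+1) ((4:Int) ^ (k-1)) > 0
            then PySem.Int.mod (n+1) ((4:Int) ^ (k-1)) else (4:Int) ^ (k-1)) = r + 1 := by
        rw [PySem.Int.mod_eq_emod_of_pos hc]
        have hmod1 : (n+1) % (4:Int)^(k-1) = (r+1) % 4^(k-1) := by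
          conv_lhs => rw [show n + 1 = (r+1) + q * 4^(k-1) by linear_combination -hdr]
          exact Int.add_mul_emod_self_right _ _ _
        rw [hmod1]
        by_cases hrc : r + 1 < 4^(k-1)
        · rw [Int.emod_eq_of_lt (by linarith) hrc, if_pos (by linarith)]
        · have hrq : r + 1 = 4^(k-1) := le_antisymm (by linarith) (by linarith)
          rw [hrq]
          simp
      -- the digit-scan tail ignores the high digit
      have hscan : scanDigits r (PySem.List.pyRange ((k:Int) - 1) 0 (-1))
          = scanDigits n (PySem.List.pyRange ((k:Int) - 1) 0 (-1)) := by
        have h := scanDigits_emod_pow (k-1) n h0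
        rw [show (((k-1 : Nat)) : Int) = (k:Int) - 1 by omega] at h
        rw [hrdef]
        exact h
      rcases (show q = 0 ∨ q = 1 ∨ q = 2 ∨ q = 3 from by omega) with hq | hq | hq | hq <;>
        rw [hq] at hdr
      · rw [hA, hB, hq, if_pos (by linarith), if_pos rfl]
      · rw [hA, hB, hq, if_neg (by linarith), if_neg (by linarith), horder, hcast1,
          ih hk r hr0 hrlt, hscan]
        norm_num
      · rw [hA, hB, hq, if_neg (by linarith), if_neg (by linarith), horder, hcast1,
          ih hk r hr0 hrlt, hscan]
        norm_num
      · rw [hA, hB, hq, if_neg (by linarith), if_pos (by linarith)]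
        norm_num

-- ===== VERDICT (by name: the statement is the Claim_ definition above) =====
theorem find_spec : Claim_equal_find := by
  unfold Claim_equal_find
  intro gen order _hdom hpre
  unfold Pre_find at hpre
  unfold Spec_find
  obtain ⟨g, rfl⟩ : ∃ g : Nat, gen = (g:Int) := ⟨gen.toNat, (Int.toNat_of_nonneg (by omega)).symm⟩
  have hg : 1 ≤ g := by exact_mod_cast hpre
  have hexp : (((g:Int)) - 1).toNat = g - 1 := by omega
  have hhi1 : (0:Int) < 4 ^ (g-1) := by positivity
  simp only [find, find_alt, hexp, Int.toNat_natCast]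
  by_cases hlo : order ≤ 0
  · -- below range: A answers "RR" at the top level (or "Rr" for g = 1); B clamps n to 0
    rw [show min (max (order - 1) 0) ((4:Int) ^ (g-1) - 1) = 0 by omega]
    obtain ⟨k, rfl⟩ : ∃ k, g = k + 1 := ⟨g - 1, by omega⟩
    rcases Nat.eq_zero_or_pos k with hk | hk
    · subst hk
      rw [show ((0+1 : Nat) : Int) - 1 = 0 by norm_num,
        PySem.List.pyRange_neg_one_eq_nil (by norm_num)]
      simp [findFuel, scanDigits]
    · have hc : (0:Int) < 4 ^ (k-1) := by positivity
      have hL : findFuel (k+1) ((k+1 : Nat) : Int) order = "RR" := by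
        simp only [findFuel]
        rw [if_neg (show ¬(((k+1 : Nat) : Int) = 1) by push_cast; omega),
          show ((((k+1 : Nat) : Int)) - 2).toNat = k - 1 by omega,
          if_pos (by linarith)]
      rw [hL, show ((k+1 : Nat) : Int) - 1 = (k : Int) by push_cast; ring,
        PySem.List.pyRange_neg_one_cons (show (0:Int) < (k:Int) by exact_mod_cast hk)]
      simp only [scanDigits]
      rw [show ((k:Int) - 1).toNat = k - 1 by omega,
        PySem.Int.floordiv_eq_ediv_of_pos hc, Int.zero_ediv,
        PySem.Int.mod_eq_emod_of_pos (by norm_num : (0:Int) < 4)]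
      norm_num
  · push Not at hlo
    by_cases hhiord : order ≤ 4 ^ (g-1)
    · -- in range: the core lemma with n = order - 1
      rw [show min (max (order - 1) 0) ((4:Int) ^ (g-1) - 1) = order - 1 by omega]
      have h := find_eq_scan g hg (order - 1) (by omega) (by omega)
      rw [show order - 1 + 1 = order by ring] at h
      exact h
    · -- above range: A answers "rr" at the top level (or "Rr" for g = 1); B clamps n to hi-1
      push Not at hhiord
      rw [show min (max (order - 1) 0) ((4:Int) ^ (g-1) - 1) = 4 ^ (g-1) - 1 by omega]
      obtain ⟨k, rfl⟩ : ∃ k, g = k + 1 := ⟨g - 1, by omega⟩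
      rcases Nat.eq_zero_or_pos k with hk | hk
      · subst hk
        rw [show ((0+1 : Nat) : Int) - 1 = 0 by norm_num,
          PySem.List.pyRange_neg_one_eq_nil (by norm_num)]
        simp [findFuel, scanDigits]
      · have hc : (0:Int) < 4 ^ (k-1) := by positivity
        have h4 : (4:Int) ^ (k+1-1) = 4 ^ (k-1) * 4 := by
          rw [show k+1-1 = k from rfl]
          conv_lhs => rw [show k = (k-1)+1 by omega]
          rw [pow_succ]
        rw [h4] at hhiord ⊢
        have hL : findFuel (k+1) ((k+1 : Nat) : Int) order = "rr" := by
          simp only [findFuel]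
          rw [if_neg (show ¬(((k+1 : Nat) : Int) = 1) by push_cast; omega),
            show ((((k+1 : Nat) : Int)) - 2).toNat = k - 1 by omega,
            if_neg (by linarith), if_pos (by linarith)]
        rw [hL, show ((k+1 : Nat) : Int) - 1 = (k : Int) by push_cast; ring,
          PySem.List.pyRange_neg_one_cons (show (0:Int) < (k:Int) by exact_mod_cast hk)]
        simp only [scanDigits]
        rw [show ((k:Int) - 1).toNat = k - 1 by omega,
          show PySem.Int.floordiv (4 ^ (k-1) * 4 - 1) ((4:Int) ^ (k-1)) = 3 by
            rw [PySem.Int.floordiv_eq_iff_of_pos hc]; constructor <;> linarith,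
          show PySem.Int.mod 3 4 = 3 by decide]
        norm_num
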